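-- pv_equiv track=rewrite | github.com/tkdwns414/Algo | 백준/Silver/12933. 오리/오리.py | solution
-- ===== SOURCE A (Python) =====
-- def solution(sound):
--     if len(sound) % 5 != 0:
--         return -1
--
--     quack = 'quack'
--     visited = [0 for _ in range(len(sound))]
--     duck = 0
--     for i in range(len(sound)):
--         if visited[i] == 0 and sound[i] == 'q':
--             duck += 1
--             state = 1
--             visited[i] = duck
--             for j in range(i + 1, len(sound)):
--                 if visited[j] == 0 and sound[j] == quack[state]:
--                     visited[j] = duck
--                     state = (state + 1) % 5
--             if state != 0:
--                 return -1
--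
--     if 0 in visited:
--         return -1
--     return duck
-- ===== SOURCE B (Python) =====
-- def solution(sound):
--     # One pass with per-state duck counters; a finished duck is reused when a new quack starts.
--     resting = waiting_u = waiting_a = waiting_c = waiting_k = 0
--     ducks = 0
--     for ch in sound:
--         if ch == 'q':
--             if resting > 0:
--                 resting -= 1
--             else:
--                 ducks += 1
--             waiting_u += 1
--         elif ch == 'u':
--             if waiting_u == 0:
--                 return -1
--             waiting_u -= 1
--             waiting_a += 1
--         elif ch == 'a':
--             if waiting_a == 0:
--                 return -1
--             waiting_a -= 1
--             waiting_c += 1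
--         elif ch == 'c':
--             if waiting_c == 0:
--                 return -1
--             waiting_c -= 1
--             waiting_k += 1
--         elif ch == 'k':
--             if waiting_k == 0:
--                 return -1
--             waiting_k -= 1
--             resting += 1
--         else:
--             return -1
--     if waiting_u or waiting_a or waiting_c or waiting_k:
--         return -1
--     return ducks
-- ===== Notes on version B (the rewrite author's own statement) =====
-- stated objective: faster
-- what changed: Replaced A's quadratic duck-major rescan (for every new duck, a fresh greedy scan of the whole rest of the string over a visited array) by a single left-to-right pass keeping one counter of ducks per quack-state, reusing a finished duck when a new quack starts.
import Mathlib
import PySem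

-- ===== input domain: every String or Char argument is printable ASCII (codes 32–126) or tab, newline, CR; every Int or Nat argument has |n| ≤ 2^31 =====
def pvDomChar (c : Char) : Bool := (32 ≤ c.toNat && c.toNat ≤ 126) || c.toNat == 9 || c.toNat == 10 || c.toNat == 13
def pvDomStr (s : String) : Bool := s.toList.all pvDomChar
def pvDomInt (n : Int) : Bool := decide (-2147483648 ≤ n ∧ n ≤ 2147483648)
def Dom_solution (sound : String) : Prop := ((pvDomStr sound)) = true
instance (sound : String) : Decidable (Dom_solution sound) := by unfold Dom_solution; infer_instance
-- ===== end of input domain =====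

-- B replaces A's duck-major rescans over a visited array with a single left-to-right pass over per-state duck counters; return values proved equal on all strings.

-- ===== PORT A =====
-- quack = 'quack'
def quackA : List Char := ['q', 'u', 'a', 'c', 'k']

-- inner loop: for j in range(i+1, len(sound)): greedily mark chars matching quack[state], cycling state
def innerA (cs : List Char) (visited : List Int) (duck : Int) (state j : Nat) :
    List Int × Nat :=
  if h : j < cs.length then
    if visited.getD j 0 = 0 ∧ cs.getD j ' ' = quackA.getD state ' ' then
      innerA cs (visited.set j duck) duck ((state + 1) % 5) (j + 1)
    else
      innerA cs visited duck state (j + 1)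
  else
    (visited, state)
termination_by cs.length - j
decreasing_by all_goals omega

-- outer loop: for i in range(len(sound)): start a new duck at every unvisited quack-start
def outerA (cs : List Char) (visited : List Int) (duck : Int) (i : Nat) : Int :=
  if h : i < cs.length then
    if visited.getD i 0 = 0 ∧ cs.getD i ' ' = 'q' then
      if (innerA cs (visited.set i (duck + 1)) (duck + 1) 1 (i + 1)).2 ≠ 0 then -1
      else outerA cs (innerA cs (visited.set i (duck + 1)) (duck + 1) 1 (i + 1)).1 (duck + 1) (i + 1)
    else
      outerA cs visited duck (i + 1)
  else
    if (0 : Int) ∈ visited then -1 else duck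
termination_by cs.length - i
decreasing_by all_goals omega

def solution (sound : String) : Int :=
  if sound.toList.length % 5 ≠ 0 then -1
  else outerA sound.toList (List.replicate sound.toList.length 0) 0 0

-- ===== PORT B =====
-- single pass; counters: resting ducks (finished, reusable) and ducks waiting to say u/a/c/k
def goB (l : List Char) (resting wu wa wc wk : Nat) (ducks : Int) : Int :=
  match l with
  | [] => if wu ≠ 0 ∨ wa ≠ 0 ∨ wc ≠ 0 ∨ wk ≠ 0 then -1 else ducks
  | ch :: t =>
    if ch = 'q' then
      if resting > 0 then goB t (resting - 1) (wu + 1) wa wc wk ducks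
      else goB t resting (wu + 1) wa wc wk (ducks + 1)
    else if ch = 'u' then
      if wu = 0 then -1 else goB t resting (wu - 1) (wa + 1) wc wk ducks
    else if ch = 'a' then
      if wa = 0 then -1 else goB t resting wu (wa - 1) (wc + 1) wk ducks
    else if ch = 'c' then
      if wc = 0 then -1 else goB t resting wu wa (wc - 1) (wk + 1) ducks
    else if ch = 'k' then
      if wk = 0 then -1 else goB t (resting + 1) wu wa wc (wk - 1) ducks
    else -1

def solution_alt (sound : String) : Int :=
  goB sound.toList 0 0 0 0 0 0

-- ===== PRECONDITION & SPEC =====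
def Spec_solution (sound : String) (out : Int) : Prop := out = solution_alt sound
instance (sound : String) (out : Int) : Decidable (Spec_solution sound out) := by unfold Spec_solution; infer_instance

-- ===== CLAIM (what is proved, stated in full; the proofs are below) =====
def Claim_equal_solution : Prop := ∀ (sound : String), Dom_solution sound → Spec_solution sound (solution sound)

-- ===== LEMMAS AND PROOFS =====

-- greedy chain extraction: consume (delete) the chars a single duck starting in `state` would take
def gx (s : Nat) : List Char → List Char × Nat
  | [] => ([], s)
  | c :: t =>
    if c = quackA.getD s ' ' then gx ((s + 1) % 5) t
    else
      let p := gx s t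
      (c :: p.1, p.2)

theorem gx_length (s : Nat) (l : List Char) : (gx s l).1.length ≤ l.length := by
  induction l generalizing s with
  | nil => simp [gx]
  | cons c t ih =>
    simp only [gx]
    split
    · exact (ih _).trans (Nat.le_succ _)
    · simpa using ih s

-- chain-major reformulation of A: extract greedy chains from the residual string
def AA : List Char → Int → Int
  | [], d => d
  | c :: t, d =>
    if c = 'q' then
      if (gx 1 t).2 ≠ 0 then -1 else AA (gx 1 t).1 (d + 1)
    else -1
termination_by l _ => l.length
decreasing_by
  exact Nat.lt_succ_of_le (gx_length 1 t)

-- residual: chars at unvisited positions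
def resid : List Int → List Char → List Char
  | v :: vt, c :: ct => if v = 0 then c :: resid vt ct else resid vt ct
  | _, _ => []

theorem resid_replicate (cs : List Char) : resid (List.replicate cs.length 0) cs = cs := by
  induction cs with
  | nil => simp [resid]
  | cons c t ih => simpa [resid, List.replicate] using ih

theorem inner_eq (cs : List Char) :
    ∀ (k j : Nat) (visited : List Int) (duck : Int) (state : Nat),
      cs.length - j ≤ k → visited.length = cs.length → duck ≠ 0 →
      (innerA cs visited duck state j).2
          = (gx state (resid (visited.drop j) (cs.drop j))).2
      ∧ resid ((innerA cs visited duck state j).1.drop j) (cs.drop j)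
          = (gx state (resid (visited.drop j) (cs.drop j))).1
      ∧ (innerA cs visited duck state j).1.length = visited.length
      ∧ ∀ p, p < j →
          (innerA cs visited duck state j).1.getD p 0 = visited.getD p 0 := by
  intro k
  induction k with
  | zero =>
    intro j visited duck state hk hlen hd
    have hj : ¬ j < cs.length := by omega
    have hdrop : cs.drop j = [] := List.drop_eq_nil_of_le (by omega)
    rw [innerA, dif_neg hj, hdrop]
    refine ⟨?_, ?_, rfl, fun p hp => rfl⟩ <;>
      cases visited.drop j <;> simp [resid, gx]
  | succ k ih =>
    intro j visited duck state hk hlen hd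
    by_cases hj : j < cs.length
    case neg =>
      have hdrop : cs.drop j = [] := List.drop_eq_nil_of_le (by omega)
      rw [innerA, dif_neg hj, hdrop]
      refine ⟨?_, ?_, rfl, fun p hp => rfl⟩ <;>
        cases visited.drop j <;> simp [resid, gx]
    case pos =>
      have hvj : j < visited.length := by omega
      have ecs : cs.drop j = cs[j] :: cs.drop (j + 1) := List.drop_eq_getElem_cons hj
      have evs : visited.drop j = visited[j] :: visited.drop (j + 1) :=
        List.drop_eq_getElem_cons hvj
      rw [innerA, dif_pos hj]
      by_cases hcond : visited.getD j 0 = 0 ∧ cs.getD j ' ' = quackA.getD state ' '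
      · rw [if_pos hcond]
        obtain ⟨hv0, hcq⟩ := hcond
        rw [List.getD_eq_getElem _ _ hvj] at hv0
        rw [List.getD_eq_getElem _ _ hj] at hcq
        have hsetlen : (visited.set j duck).length = cs.length := by
          rw [List.length_set, hlen]
        obtain ⟨ih1, ih2, ih3, ih4⟩ :=
          ih (j + 1) (visited.set j duck) duck ((state + 1) % 5) (by omega) hsetlen hd
        have hds : (visited.set j duck).drop (j + 1) = visited.drop (j + 1) := by
          rw [List.drop_set, if_pos (by omega)]
        rw [hds] at ih1 ih2
        rw [ecs, evs]
        have hres : resid (visited[j] :: visited.drop (j + 1)) (cs[j] :: cs.drop (j + 1))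
            = cs[j] :: resid (visited.drop (j + 1)) (cs.drop (j + 1)) := by
          simp [resid, hv0]
        rw [hres]
        have hgx : gx state (cs[j] :: resid (visited.drop (j + 1)) (cs.drop (j + 1)))
            = gx ((state + 1) % 5) (resid (visited.drop (j + 1)) (cs.drop (j + 1))) := by
          simp [gx, hcq]
        rw [hgx]
        have hreslen : (innerA cs (visited.set j duck) duck ((state + 1) % 5) (j + 1)).1.length
            = visited.length := by rw [ih3, List.length_set]
        have hjres : j < (innerA cs (visited.set j duck) duck ((state + 1) % 5) (j + 1)).1.length := by
          omega
        have hresj : (innerA cs (visited.set j duck) duck ((state + 1) % 5) (j + 1)).1[j] = duck := by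
          have h4 := ih4 j (by omega)
          rw [List.getD_eq_getElem _ _ hjres, List.getD_eq_getElem _ _ (by rw [List.length_set]; omega)]
            at h4
          rw [h4, List.getElem_set_self]
        refine ⟨ih1, ?_, hreslen, ?_⟩
        · rw [List.drop_eq_getElem_cons hjres, hresj]
          simpa [resid, hd] using ih2
        · intro p hp
          have h4 := ih4 p (by omega)
          have hplen : p < visited.length := by omega
          rw [h4, List.getD_eq_getElem _ _ (by rw [List.length_set]; omega),
            List.getD_eq_getElem _ _ hplen, List.getElem_set_ne (by omega)]
      · rw [if_neg hcond]
        obtain ⟨ih1, ih2, ih3, ih4⟩ := ih (j + 1) visited duck state (by omega) hlen hd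
        have hjres : j < (innerA cs visited duck state (j + 1)).1.length := by
          rw [ih3]; omega
        have hresj : (innerA cs visited duck state (j + 1)).1[j] = visited[j] := by
          have h4 := ih4 j (by omega)
          rw [List.getD_eq_getElem _ _ hjres, List.getD_eq_getElem _ _ hvj] at h4
          exact h4
        rw [ecs, evs]
        by_cases hv0 : visited[j] = 0
        · have hcq : ¬ cs.getD j ' ' = quackA.getD state ' ' := fun hc =>
            hcond ⟨by rw [List.getD_eq_getElem _ _ hvj, hv0], hc⟩
          rw [List.getD_eq_getElem _ _ hj] at hcq
          simp only [List.getD] at hcq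
          have hres : resid (visited[j] :: visited.drop (j + 1)) (cs[j] :: cs.drop (j + 1))
              = cs[j] :: resid (visited.drop (j + 1)) (cs.drop (j + 1)) := by
            simp [resid, hv0]
          rw [hres]
          refine ⟨?_, ?_, ih3, fun p hp => ih4 p (by omega)⟩
          · simpa [gx, hcq] using ih1
          · rw [List.drop_eq_getElem_cons hjres, hresj]
            simp only [resid, if_pos hv0]
            simp [gx, hcq, ih2]
        · have hres : resid (visited[j] :: visited.drop (j + 1)) (cs[j] :: cs.drop (j + 1))
              = resid (visited.drop (j + 1)) (cs.drop (j + 1)) := by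
            simp [resid, hv0]
          rw [hres]
          refine ⟨ih1, ?_, ih3, fun p hp => ih4 p (by omega)⟩
          rw [List.drop_eq_getElem_cons hjres, hresj]
          simpa [resid, hv0] using ih2

theorem outer_stuck (cs : List Char) :
    ∀ (k i : Nat) (visited : List Int) (duck : Int),
      cs.length - i ≤ k → visited.length = cs.length → 0 ≤ duck →
      (∃ p, p < i ∧ p < cs.length ∧ visited.getD p 0 = 0) →
      outerA cs visited duck i = -1 := by
  intro k
  induction k with
  | zero =>
    intro i visited duck hk hlen hduck hw
    obtain ⟨p, hpi, hpl, hp0⟩ := hw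
    rw [outerA, dif_neg (by omega)]
    rw [List.getD_eq_getElem _ _ (by omega)] at hp0
    rw [if_pos (List.mem_iff_getElem.mpr ⟨p, by omega, hp0⟩)]
  | succ k ih =>
    intro i visited duck hk hlen hduck hw
    obtain ⟨p, hpi, hpl, hp0⟩ := hw
    by_cases hj : i < cs.length
    case neg =>
      rw [outerA, dif_neg hj]
      rw [List.getD_eq_getElem _ _ (by omega)] at hp0
      rw [if_pos (List.mem_iff_getElem.mpr ⟨p, by omega, hp0⟩)]
    case pos =>
      rw [outerA, dif_pos hj]
      by_cases hcond : visited.getD i 0 = 0 ∧ cs.getD i ' ' = 'q'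
      · rw [if_pos hcond]
        have hsetlen : (visited.set i (duck + 1)).length = cs.length := by
          rw [List.length_set, hlen]
        obtain ⟨_, _, ih3, ih4⟩ :=
          inner_eq cs (cs.length - (i + 1)) (i + 1) (visited.set i (duck + 1)) (duck + 1) 1
            le_rfl hsetlen (by omega)
        split_ifs with hst
        · rfl
        · apply ih (i + 1) _ (duck + 1) (by omega) (by rw [ih3, List.length_set, hlen]) (by omega)
          refine ⟨p, by omega, hpl, ?_⟩
          rw [ih4 p (by omega)]
          rw [List.getD_eq_getElem _ _ (by rw [List.length_set]; omega),
            List.getElem_set_ne (by omega), ← List.getD_eq_getElem _ _ (by omega)]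
          exact hp0
      · rw [if_neg hcond]
        exact ih (i + 1) visited duck (by omega) hlen hduck ⟨p, by omega, hpl, hp0⟩

theorem outer_eq (cs : List Char) :
    ∀ (k i : Nat) (visited : List Int) (duck : Int),
      cs.length - i ≤ k → visited.length = cs.length → 0 ≤ duck →
      (∀ p, p < i → visited.getD p 0 ≠ 0) →
      outerA cs visited duck i = AA (resid (visited.drop i) (cs.drop i)) duck := by
  intro k
  induction k with
  | zero =>
    intro i visited duck hk hlen hduck hall
    have hdrop : cs.drop i = [] := List.drop_eq_nil_of_le (by omega)
    rw [outerA, dif_neg (by omega), hdrop]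
    rw [if_neg]
    · cases visited.drop i <;> simp [resid, AA]
    · intro hmem
      obtain ⟨p, hplen, hp⟩ := List.mem_iff_getElem.mp hmem
      exact hall p (by omega) (by rw [List.getD_eq_getElem _ _ hplen]; exact hp)
  | succ k ih =>
    intro i visited duck hk hlen hduck hall
    by_cases hj : i < cs.length
    case neg =>
      have hdrop : cs.drop i = [] := List.drop_eq_nil_of_le (by omega)
      rw [outerA, dif_neg hj, hdrop]
      rw [if_neg]
      · cases visited.drop i <;> simp [resid, AA]
      · intro hmem
        obtain ⟨p, hplen, hp⟩ := List.mem_iff_getElem.mp hmem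
        exact hall p (by omega) (by rw [List.getD_eq_getElem _ _ hplen]; exact hp)
    case pos =>
      have hvj : i < visited.length := by omega
      have ecs : cs.drop i = cs[i] :: cs.drop (i + 1) := List.drop_eq_getElem_cons hj
      have evs : visited.drop i = visited[i] :: visited.drop (i + 1) :=
        List.drop_eq_getElem_cons hvj
      rw [outerA, dif_pos hj]
      by_cases hv0 : visited[i] = 0
      · by_cases hq : cs[i] = 'q'
        · rw [if_pos ⟨by rw [List.getD_eq_getElem _ _ hvj]; exact hv0,
            by rw [List.getD_eq_getElem _ _ hj]; exact hq⟩]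
          have hsetlen : (visited.set i (duck + 1)).length = cs.length := by
            rw [List.length_set, hlen]
          obtain ⟨ih1, ih2, ih3, ih4⟩ :=
            inner_eq cs (cs.length - (i + 1)) (i + 1) (visited.set i (duck + 1)) (duck + 1) 1
              le_rfl hsetlen (by omega)
          have hds : (visited.set i (duck + 1)).drop (i + 1) = visited.drop (i + 1) := by
            rw [List.drop_set, if_pos (by omega)]
          rw [hds] at ih1 ih2
          rw [evs, ecs]
          have hres : resid (visited[i] :: visited.drop (i + 1)) (cs[i] :: cs.drop (i + 1))
              = cs[i] :: resid (visited.drop (i + 1)) (cs.drop (i + 1)) := by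
            simp [resid, hv0]
          rw [hres, hq]
          rw [show AA ('q' :: resid (visited.drop (i + 1)) (cs.drop (i + 1))) duck
              = if (gx 1 (resid (visited.drop (i + 1)) (cs.drop (i + 1)))).2 ≠ 0 then -1
                else AA (gx 1 (resid (visited.drop (i + 1)) (cs.drop (i + 1)))).1 (duck + 1)
            from by simp [AA]]
          rw [ih1]
          split_ifs with hst
          · rfl
          · rw [ih (i + 1) _ (duck + 1) (by omega) (by rw [ih3, List.length_set, hlen]) (by omega)
              ?_, ih2]
            intro p hp
            rw [ih4 p (by omega)]
            by_cases hpi : p = i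
            · subst hpi
              rw [List.getD_eq_getElem _ _ (by rw [List.length_set]; omega),
                List.getElem_set_self]
              omega
            · rw [List.getD_eq_getElem _ _ (by rw [List.length_set]; omega),
                List.getElem_set_ne (by omega), ← List.getD_eq_getElem _ _ (by omega)]
              exact hall p (by omega)
        · rw [if_neg (by
            intro hcond
            rw [List.getD_eq_getElem _ _ hj] at hcond
            exact hq hcond.2)]
          rw [outer_stuck cs (cs.length - (i + 1)) (i + 1) visited duck le_rfl hlen hduck
            ⟨i, by omega, hj, by rw [List.getD_eq_getElem _ _ hvj]; exact hv0⟩]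
          rw [evs, ecs]
          have hres : resid (visited[i] :: visited.drop (i + 1)) (cs[i] :: cs.drop (i + 1))
              = cs[i] :: resid (visited.drop (i + 1)) (cs.drop (i + 1)) := by
            simp [resid, hv0]
          rw [hres]
          simp [AA, hq]
      · rw [if_neg (by
          intro hcond
          rw [List.getD_eq_getElem _ _ hvj] at hcond
          exact hv0 hcond.1)]
        rw [evs, ecs]
        have hres : resid (visited[i] :: visited.drop (i + 1)) (cs[i] :: cs.drop (i + 1))
            = resid (visited.drop (i + 1)) (cs.drop (i + 1)) := by
          simp [resid, hv0]
        rw [hres]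
        rw [ih (i + 1) visited duck (by omega) hlen hduck ?_]
        intro p hp
        by_cases hpi : p = i
        · subst hpi
          rw [List.getD_eq_getElem _ _ hvj]
          exact hv0
        · exact hall p (by omega)

theorem goB_split :
    ∀ (L : List Char) (s r0 r1 r2 r3 r4 : Nat) (d : Int), s < 5 →
      goB L (r0 + if s = 0 then 1 else 0) (r1 + if s = 1 then 1 else 0)
            (r2 + if s = 2 then 1 else 0) (r3 + if s = 3 then 1 else 0)
            (r4 + if s = 4 then 1 else 0) d
        = if (gx s L).2 = 0 then goB (gx s L).1 r0 r1 r2 r3 r4 d else -1 := by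
  intro L
  induction L with
  | nil =>
    intro s r0 r1 r2 r3 r4 d hs
    interval_cases s <;> simp [goB, gx]
  | cons c t ih =>
    intro s r0 r1 r2 r3 r4 d hs
    interval_cases s
    · -- thread state 0: chain char 'q'
      by_cases hch : c = 'q'
      · subst hch
        simpa [goB, gx, quackA] using ih 1 r0 r1 r2 r3 r4 d (by omega)
      · by_cases hu1 : c = 'u'
        · subst hu1
          rcases Nat.eq_zero_or_pos r1 with h0 | h0
          · simp [goB, gx, quackA, h0]
          · simpa [goB, gx, quackA, h0, h0.ne'] using ih 0 r0 (r1 - 1) (r2 + 1) r3 r4 d (by omega)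
        · by_cases ha2 : c = 'a'
          · subst ha2
            rcases Nat.eq_zero_or_pos r2 with h0 | h0
            · simp [goB, gx, quackA, h0]
            · simpa [goB, gx, quackA, h0, h0.ne'] using ih 0 r0 r1 (r2 - 1) (r3 + 1) r4 d (by omega)
          · by_cases hc3 : c = 'c'
            · subst hc3
              rcases Nat.eq_zero_or_pos r3 with h0 | h0
              · simp [goB, gx, quackA, h0]
              · simpa [goB, gx, quackA, h0, h0.ne'] using ih 0 r0 r1 r2 (r3 - 1) (r4 + 1) d (by omega)
            · by_cases hk4 : c = 'k'
              · subst hk4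
                rcases Nat.eq_zero_or_pos r4 with h0 | h0
                · simp [goB, gx, quackA, h0]
                · simpa [goB, gx, quackA, h0, h0.ne'] using ih 0 (r0 + 1) r1 r2 r3 (r4 - 1) d (by omega)
              · simp [goB, gx, quackA, hch, hu1, ha2, hc3, hk4]
    · -- thread state 1: chain char 'u'
      by_cases hch : c = 'u'
      · subst hch
        simpa [goB, gx, quackA] using ih 2 r0 r1 r2 r3 r4 d (by omega)
      · by_cases hq0 : c = 'q'
        · subst hq0
          rcases Nat.eq_zero_or_pos r0 with h0 | h0
          · simpa [goB, gx, quackA, h0] using ih 1 r0 (r1 + 1) r2 r3 r4 (d + 1) (by omega)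
          · simpa [goB, gx, quackA, h0, h0.ne'] using ih 1 (r0 - 1) (r1 + 1) r2 r3 r4 d (by omega)
        · by_cases ha2 : c = 'a'
          · subst ha2
            rcases Nat.eq_zero_or_pos r2 with h0 | h0
            · simp [goB, gx, quackA, h0]
            · simpa [goB, gx, quackA, h0, h0.ne'] using ih 1 r0 r1 (r2 - 1) (r3 + 1) r4 d (by omega)
          · by_cases hc3 : c = 'c'
            · subst hc3
              rcases Nat.eq_zero_or_pos r3 with h0 | h0
              · simp [goB, gx, quackA, h0]
              · simpa [goB, gx, quackA, h0, h0.ne'] using ih 1 r0 r1 r2 (r3 - 1) (r4 + 1) d (by omega)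
            · by_cases hk4 : c = 'k'
              · subst hk4
                rcases Nat.eq_zero_or_pos r4 with h0 | h0
                · simp [goB, gx, quackA, h0]
                · simpa [goB, gx, quackA, h0, h0.ne'] using ih 1 (r0 + 1) r1 r2 r3 (r4 - 1) d (by omega)
              · simp [goB, gx, quackA, hch, hq0, ha2, hc3, hk4]
    · -- thread state 2: chain char 'a'
      by_cases hch : c = 'a'
      · subst hch
        simpa [goB, gx, quackA] using ih 3 r0 r1 r2 r3 r4 d (by omega)
      · by_cases hq0 : c = 'q'
        · subst hq0
          rcases Nat.eq_zero_or_pos r0 with h0 | h0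
          · simpa [goB, gx, quackA, h0] using ih 2 r0 (r1 + 1) r2 r3 r4 (d + 1) (by omega)
          · simpa [goB, gx, quackA, h0, h0.ne'] using ih 2 (r0 - 1) (r1 + 1) r2 r3 r4 d (by omega)
        · by_cases hu1 : c = 'u'
          · subst hu1
            rcases Nat.eq_zero_or_pos r1 with h0 | h0
            · simp [goB, gx, quackA, h0]
            · simpa [goB, gx, quackA, h0, h0.ne'] using ih 2 r0 (r1 - 1) (r2 + 1) r3 r4 d (by omega)
          · by_cases hc3 : c = 'c'
            · subst hc3
              rcases Nat.eq_zero_or_pos r3 with h0 | h0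
              · simp [goB, gx, quackA, h0]
              · simpa [goB, gx, quackA, h0, h0.ne'] using ih 2 r0 r1 r2 (r3 - 1) (r4 + 1) d (by omega)
            · by_cases hk4 : c = 'k'
              · subst hk4
                rcases Nat.eq_zero_or_pos r4 with h0 | h0
                · simp [goB, gx, quackA, h0]
                · simpa [goB, gx, quackA, h0, h0.ne'] using ih 2 (r0 + 1) r1 r2 r3 (r4 - 1) d (by omega)
              · simp [goB, gx, quackA, hch, hq0, hu1, hc3, hk4]
    · -- thread state 3: chain char 'c'
      by_cases hch : c = 'c'
      · subst hch
        simpa [goB, gx, quackA] using ih 4 r0 r1 r2 r3 r4 d (by omega)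
      · by_cases hq0 : c = 'q'
        · subst hq0
          rcases Nat.eq_zero_or_pos r0 with h0 | h0
          · simpa [goB, gx, quackA, h0] using ih 3 r0 (r1 + 1) r2 r3 r4 (d + 1) (by omega)
          · simpa [goB, gx, quackA, h0, h0.ne'] using ih 3 (r0 - 1) (r1 + 1) r2 r3 r4 d (by omega)
        · by_cases hu1 : c = 'u'
          · subst hu1
            rcases Nat.eq_zero_or_pos r1 with h0 | h0
            · simp [goB, gx, quackA, h0]
            · simpa [goB, gx, quackA, h0, h0.ne'] using ih 3 r0 (r1 - 1) (r2 + 1) r3 r4 d (by omega)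
          · by_cases ha2 : c = 'a'
            · subst ha2
              rcases Nat.eq_zero_or_pos r2 with h0 | h0
              · simp [goB, gx, quackA, h0]
              · simpa [goB, gx, quackA, h0, h0.ne'] using ih 3 r0 r1 (r2 - 1) (r3 + 1) r4 d (by omega)
            · by_cases hk4 : c = 'k'
              · subst hk4
                rcases Nat.eq_zero_or_pos r4 with h0 | h0
                · simp [goB, gx, quackA, h0]
                · simpa [goB, gx, quackA, h0, h0.ne'] using ih 3 (r0 + 1) r1 r2 r3 (r4 - 1) d (by omega)
              · simp [goB, gx, quackA, hch, hq0, hu1, ha2, hk4]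
    · -- thread state 4: chain char 'k'
      by_cases hch : c = 'k'
      · subst hch
        simpa [goB, gx, quackA] using ih 0 r0 r1 r2 r3 r4 d (by omega)
      · by_cases hq0 : c = 'q'
        · subst hq0
          rcases Nat.eq_zero_or_pos r0 with h0 | h0
          · simpa [goB, gx, quackA, h0] using ih 4 r0 (r1 + 1) r2 r3 r4 (d + 1) (by omega)
          · simpa [goB, gx, quackA, h0, h0.ne'] using ih 4 (r0 - 1) (r1 + 1) r2 r3 r4 d (by omega)
        · by_cases hu1 : c = 'u'
          · subst hu1
            rcases Nat.eq_zero_or_pos r1 with h0 | h0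
            · simp [goB, gx, quackA, h0]
            · simpa [goB, gx, quackA, h0, h0.ne'] using ih 4 r0 (r1 - 1) (r2 + 1) r3 r4 d (by omega)
          · by_cases ha2 : c = 'a'
            · subst ha2
              rcases Nat.eq_zero_or_pos r2 with h0 | h0
              · simp [goB, gx, quackA, h0]
              · simpa [goB, gx, quackA, h0, h0.ne'] using ih 4 r0 r1 (r2 - 1) (r3 + 1) r4 d (by omega)
            · by_cases hc3 : c = 'c'
              · subst hc3
                rcases Nat.eq_zero_or_pos r3 with h0 | h0
                · simp [goB, gx, quackA, h0]
                · simpa [goB, gx, quackA, h0, h0.ne'] using ih 4 r0 r1 r2 (r3 - 1) (r4 + 1) d (by omega)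
              · simp [goB, gx, quackA, hch, hq0, hu1, ha2, hc3]

theorem AA_eq_goB_aux :
    ∀ (n : Nat) (L : List Char), L.length ≤ n → ∀ (d : Int), AA L d = goB L 0 0 0 0 0 d := by
  intro n
  induction n with
  | zero =>
    intro L hL d
    have : L = [] := List.eq_nil_of_length_eq_zero (by omega)
    subst this
    simp [AA, goB]
  | succ n ih =>
    intro L hL d
    match L with
    | [] => simp [AA, goB]
    | c :: t =>
      by_cases hc : c = 'q'
      · subst hc
        have hsplit := goB_split t 1 0 0 0 0 0 (d + 1) (by omega)
        simp only [List.length_cons] at hL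
        by_cases hf : (gx 1 t).2 = 0
        · have hlen : (gx 1 t).1.length ≤ n := le_trans (gx_length 1 t) (by omega)
          simp [AA, goB, hf]
          rw [ih _ hlen (d + 1)]
          simpa [hf] using hsplit.symm
        · simp [AA, goB, hf]
          simpa [hf] using hsplit.symm
      · simp [AA, goB, hc]

theorem AA_eq_goB : ∀ (L : List Char) (d : Int), AA L d = goB L 0 0 0 0 0 d := by
  intro L d
  exact AA_eq_goB_aux L.length L le_rfl d

theorem goB_mod (L : List Char) :
    ∀ (r0 r1 r2 r3 r4 : Nat) (d : Int),
      (L.length + (r1 + 2 * r2 + 3 * r3 + 4 * r4)) % 5 ≠ 0 →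
      goB L r0 r1 r2 r3 r4 d = -1 := by
  induction L with
  | nil =>
    intro r0 r1 r2 r3 r4 d h
    simp only [List.length_nil] at h
    simp only [goB]
    rw [if_pos (by omega)]
  | cons c t ih =>
    intro r0 r1 r2 r3 r4 d h
    simp only [List.length_cons] at h
    simp only [goB]
    split_ifs <;> first | rfl | (apply ih; omega)

-- ===== VERDICT (by name: the statement is the Claim_ definition above) =====
theorem solution_spec : Claim_equal_solution := by
  intro sound _
  unfold Spec_solution solution solution_alt
  by_cases h5 : sound.toList.length % 5 ≠ 0
  · rw [if_pos h5]
    exact (goB_mod sound.toList 0 0 0 0 0 0 (by simpa using h5)).symm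
  · rw [if_neg h5]
    rw [outer_eq sound.toList sound.toList.length 0 _ 0 (by omega) (by simp) le_rfl
        (by intro p hp; omega)]
    simp only [List.drop_zero, resid_replicate]
    exact AA_eq_goB _ _
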